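-- pv_equiv track=rewrite | github.com/ali-pakdel/Data-Structures | Intro/Part1.py | calculate_possibilities
-- ===== SOURCE A (Python) =====
-- def calculate_possibilities(first_num, second_num):
--     result = 0
--     index1 = find_first_unknown_digit(second_num)
--     index2 = find_second_unknown_digit(second_num[index1 + 1:]) + index1 + 1
--     if index1 >= 0:
--         if index2 >= 0:
--             result += first_case(first_num[index1:], second_num[index1:])
--
--             if compare(first_num[index1 + 1:index2], second_num[index1 + 1:index2]) == 2:
--                 return bigger_num(second_num[index1:]) + result
--             elif compare(first_num[index1 + 1:index2], second_num[index1 + 1:index2]) == 0: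
--                 return result
--             return result + int(calculate_possibilities(first_num[index2:], second_num[index2:]))
--         else:
--             return first_case(first_num[index1:], second_num[index1:])
--         return 0
--
-- def bigger_num(second_num):
--     return 10 ** ((len(list(filter(lambda x : x == '?', second_num)))) - 1)
--
-- def compare(first_num, second_num):
--     if first_num > second_num:
--         return 2
--     elif first_num == second_num:
--         return 1
--     return 0
--
-- def find_first_unknown_digit(second_num):
--     for x in second_num:
--         if x == '?':
--             return second_num.index('?')
--     return -100
--
-- def find_second_unknown_digit(second_num):
--     for x in second_num:
--         if x == '?':
--             return second_num.index('?')
--     return -100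
--
-- def first_case(first_num, second_num):
--     if int(first_num[0]) > 0:
--         return int(first_num[0]) * (10 ** (len(list(filter(lambda x : x == '?', second_num))) - 1))
--     else:
--         return 0
-- ===== SOURCE B (Python) =====
-- def calculate_possibilities(first_num, second_num):
--     qs = [i for i, c in enumerate(second_num) if c == '?']
--     if not qs:
--         return None
--     result = 0
--     for j, p in enumerate(qs):
--         remaining = len(qs) - j
--         d = int(first_num[p])
--         if d > 0:
--             result += d * 10 ** (remaining - 1)
--         if j + 1 == len(qs):
--             return result
--         q = qs[j + 1]
--         left, right = first_num[p + 1:q], second_num[p + 1:q]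
--         if left > right:
--             return 10 ** (remaining - 1) + result
--         if left != right:
--             return result
--     return result
-- ===== Notes on version B (the rewrite author's own statement) =====
-- stated objective: alternative
-- what changed: Replaces A's helper-based recursion (which re-slices both strings and re-scans each suffix with index()/filter at every '?') by a single iterative loop over the precomputed list of '?' positions, carrying an integer accumulator and taking the remaining-'?' count from that list.
-- outside the precondition, e.g. on calculate_possibilities('19x', '?5?'): A returns 20, B returns 20
import Mathlib
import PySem

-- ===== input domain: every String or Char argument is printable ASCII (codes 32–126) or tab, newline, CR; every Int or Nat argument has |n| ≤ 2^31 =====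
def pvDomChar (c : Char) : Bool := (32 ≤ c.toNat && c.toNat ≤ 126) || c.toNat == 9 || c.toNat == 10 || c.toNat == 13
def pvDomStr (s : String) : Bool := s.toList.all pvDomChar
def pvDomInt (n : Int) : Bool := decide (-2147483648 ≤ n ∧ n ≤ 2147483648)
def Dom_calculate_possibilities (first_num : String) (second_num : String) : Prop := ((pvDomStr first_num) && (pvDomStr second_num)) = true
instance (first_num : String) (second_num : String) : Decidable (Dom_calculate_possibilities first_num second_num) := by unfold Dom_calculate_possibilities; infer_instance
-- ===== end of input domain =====

-- B replaces A's helper-based recursion-with-reslicing by a single accumulator loop over the precomputed '?'-positions (return-value equivalence; simpler decomposition).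


-- Python's lexicographic '<' on strings, over code points (shared primitive used by both ports).
def pyLtChars : List Char → List Char → Bool
  | [], [] => false
  | [], _ :: _ => true
  | _ :: _, [] => false
  | a :: as, b :: bs => if a < b then true else if b < a then false else pyLtChars as bs

-- ===== PORT A =====
def find_first_unknown_digit (s : List Char) : Int :=
  match PySem.List.index? s '?' with
  | some i => (i : Int)
  | none => -100

def find_second_unknown_digit (s : List Char) : Int :=
  match PySem.List.index? s '?' with
  | some i => (i : Int)
  | none => -100

-- exact when s contains a '?' (its only reachable use); for count 0 Python yields the float 10**-1
def bigger_num (s : List Char) : Int := (10 : Int) ^ (s.countP (· == '?') - 1)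

def compare_py (a b : List Char) : Int :=
  if pyLtChars b a then 2 else if a = b then 1 else 0

-- none = first_num[0] raised (IndexError) or int() raised (ValueError); exponent exact when second_num contains a '?' (its only reachable use)
def first_case (first_num second_num : List Char) : Option Int :=
  match PySem.List.pyGet? first_num 0 with
  | none => none
  | some c =>
    match PySem.Int.ofChars? [c] with
    | none => none
    | some d =>
      if d > 0 then some (d * (10 : Int) ^ (second_num.countP (· == '?') - 1)) else some 0

-- fuel makes the recursion total: 0-fuel (Python's infinite recursion, excluded by Pre_) returns none
def calc_go : Nat → List Char → List Char → Option Int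
  | 0, _, _ => none
  | fuel + 1, f, s =>
    let index1 := find_first_unknown_digit s
    let index2 := find_second_unknown_digit (PySem.List.slice s (some (index1 + 1)) none) + index1 + 1
    if index1 ≥ 0 then
      if index2 ≥ 0 then
        match first_case (PySem.List.slice f (some index1) none) (PySem.List.slice s (some index1) none) with
        | none => none
        | some r =>
          let c := compare_py (PySem.List.slice f (some (index1 + 1)) (some index2))
                              (PySem.List.slice s (some (index1 + 1)) (some index2))
          if c = 2 then some (bigger_num (PySem.List.slice s (some index1) none) + r)
          else if c = 0 then some r
          else
            match calc_go fuel (PySem.List.slice f (some index2) none) (PySem.List.slice s (some index2) none) with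
            | none => none
            | some v => some (r + v)
      else first_case (PySem.List.slice f (some index1) none) (PySem.List.slice s (some index1) none)
    else none

def calculate_possibilities (first_num : String) (second_num : String) : Option Int :=
  calc_go (second_num.toList.length + 1) first_num.toList second_num.toList

-- ===== PORT B =====
-- the '?'-position comprehension [i for i, c in enumerate(second_num) if c == '?']
def qpositions : List Char → Nat → List Nat
  | [], _ => []
  | c :: t, i => if c = '?' then i :: qpositions t (i + 1) else qpositions t (i + 1)

-- B's for-loop over the remaining '?' positions; none = int(first_num[p]) raised
def bLoop (f s : List Char) : Int → List Nat → Option Int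
  | result, [] => some result
  | result, p :: rest =>
    match PySem.List.pyGet? f (p : Int) with
    | none => none
    | some c =>
      match PySem.Int.ofChars? [c] with
      | none => none
      | some d =>
        let remaining := rest.length + 1
        let result' := if d > 0 then result + d * (10 : Int) ^ (remaining - 1) else result
        match rest with
        | [] => some result'
        | q :: _ =>
          let left := PySem.List.slice f (some ((p : Int) + 1)) (some (q : Int))
          let right := PySem.List.slice s (some ((p : Int) + 1)) (some (q : Int))
          if pyLtChars right left then some ((10 : Int) ^ (remaining - 1) + result')
          else if left ≠ right then some result'
          else bLoop f s result' rest

def calculate_possibilities_alt (first_num : String) (second_num : String) : Option Int :=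
  let qs := qpositions second_num.toList 0
  if qs.isEmpty then none else bLoop first_num.toList second_num.toList 0 qs

-- ===== PRECONDITION & SPEC =====
-- Pre_ requires a digit of first_num at every '?' position of second_num (A's first_case otherwise raises
-- ValueError/IndexError at the first such position it reaches; at '?' positions behind an early-terminating
-- segment comparison this is slightly narrower than A's actual domain) and excludes a single '?' at index
-- ≥ 99, where A's '-100 + index1 + 1' sentinel arithmetic sends it into infinite recursion.
def Pre_calculate_possibilities (first_num : String) (second_num : String) : Prop :=
  ∀ p, (h : p < second_num.toList.length) → second_num.toList[p] = '?' →
    ((first_num.toList[p]?.map Char.isDigit).getD false = true ∧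
     (second_num.toList.countP (· == '?') = 1 → p ≤ 98))
instance (first_num : String) (second_num : String) : Decidable (Pre_calculate_possibilities first_num second_num) := by unfold Pre_calculate_possibilities; infer_instance

def pvWitness_calculate_possibilities : String × String := ("523", "??3")

def Spec_calculate_possibilities (first_num : String) (second_num : String) (out : Option Int) : Prop := out = calculate_possibilities_alt first_num second_num
instance (first_num : String) (second_num : String) (out : Option Int) : Decidable (Spec_calculate_possibilities first_num second_num out) := by unfold Spec_calculate_possibilities; infer_instance

-- ===== CLAIM (what is proved, stated in full; the proofs are below) =====
def Claim_equal_calculate_possibilities : Prop := ∀ (first_num : String) (second_num : String), Dom_calculate_possibilities first_num second_num → Pre_calculate_possibilities first_num second_num → Spec_calculate_possibilities first_num second_num (calculate_possibilities first_num second_num)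


-- ===== LEMMAS AND PROOFS =====

theorem qpositions_shift (S : List Char) (i : Nat) :
    qpositions S i = (qpositions S 0).map (· + i) := by
  induction S generalizing i with
  | nil => simp [qpositions]
  | cons c t ih =>
    simp only [qpositions]
    rw [ih (i + 1), ih 1]
    by_cases hc : c = '?'
    · simp only [if_pos hc, List.map_cons, List.map_map]
      congr 1
      · omega
      · exact List.map_congr_left (fun x _ => by simp only [Function.comp_apply]; omega)
    · simp only [if_neg hc, List.map_map]
      exact List.map_congr_left (fun x _ => by simp only [Function.comp_apply]; omega)

theorem qpos_cons (c : Char) (t : List Char) :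
    qpositions (c :: t) 0 =
      if c = '?' then 0 :: (qpositions t 0).map (· + 1) else (qpositions t 0).map (· + 1) := by
  simp only [qpositions, qpositions_shift t 1]

theorem qpos_sorted (S : List Char) : (qpositions S 0).Pairwise (· < ·) := by
  induction S with
  | nil => simp [qpositions]
  | cons c t ih =>
    rw [qpos_cons]
    have hm : ((qpositions t 0).map (· + 1)).Pairwise (· < ·) := by
      rw [List.pairwise_map]; exact ih.imp (by omega)
    by_cases hc : c = '?'
    · simp only [if_pos hc, List.pairwise_cons]
      refine ⟨fun x hx => ?_, hm⟩
      simp only [List.mem_map] at hx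
      obtain ⟨y, _, h⟩ := hx
      omega
    · rw [if_neg hc]
      exact hm

theorem qpos_mem (S : List Char) (p : Nat) :
    p ∈ qpositions S 0 ↔ S[p]? = some '?' := by
  induction S generalizing p with
  | nil => simp [qpositions]
  | cons c t ih =>
    rw [qpos_cons]
    by_cases hc : c = '?'
    · rw [if_pos hc]
      cases p with
      | zero => simp [hc]
      | succ m =>
        simp only [List.mem_cons, List.mem_map, List.getElem?_cons_succ, ← ih]
        constructor
        · rintro (h | ⟨x, hx, hx1⟩)
          · exact absurd h (by omega)
          · have hxm : x = m := by omega
            subst hxm; exact hx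
        · intro h; exact Or.inr ⟨m, h, rfl⟩
    · rw [if_neg hc]
      cases p with
      | zero =>
        simp only [List.mem_map, List.getElem?_cons_zero]
        constructor
        · rintro ⟨x, _, hx1⟩; omega
        · intro h; exact absurd (Option.some.inj h) hc
      | succ m =>
        simp only [List.mem_map, List.getElem?_cons_succ, ← ih]
        constructor
        · rintro ⟨x, hx, hx1⟩
          have hxm : x = m := by omega
          subst hxm; exact hx
        · intro h; exact ⟨m, h, rfl⟩

theorem qpos_count (S : List Char) :
    S.countP (· == '?') = (qpositions S 0).length := by
  induction S with
  | nil => simp [qpositions]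
  | cons c t ih =>
    rw [qpos_cons, List.countP_cons]
    by_cases hc : c = '?' <;> simp [hc, ih]

theorem qpos_length_le (S : List Char) : (qpositions S 0).length ≤ S.length := by
  induction S with
  | nil => simp [qpositions]
  | cons c t ih =>
    rw [qpos_cons]
    by_cases hc : c = '?' <;> simp [hc] <;> omega

theorem qpos_index? (S : List Char) :
    PySem.List.index? S '?' = (qpositions S 0).head? := by
  induction S with
  | nil => simp [qpositions, PySem.List.index?]
  | cons c t ih =>
    rw [qpos_cons]
    by_cases hc : c = '?'
    · subst hc
      rw [if_pos rfl, PySem.List.index?_cons_self]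
      simp
    · rw [if_neg hc, PySem.List.index?_cons_of_ne t hc, ih]
      cases qpositions t 0 <;> simp

theorem qpos_drop (S : List Char) (k : Nat) :
    qpositions (S.drop k) 0 = ((qpositions S 0).filter (fun x => k ≤ x)).map (· - k) := by
  induction S generalizing k with
  | nil => simp [qpositions]
  | cons c t ih =>
    cases k with
    | zero =>
      rw [List.drop_zero]
      have h1 : List.filter (fun x => decide (0 ≤ x)) (qpositions (c :: t) 0) =
          qpositions (c :: t) 0 := List.filter_eq_self.mpr (fun x _ => by simp)
      rw [h1]
      have h2 : (qpositions (c :: t) 0).map (· - 0) = (qpositions (c :: t) 0).map id :=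
        List.map_congr_left (fun x _ => Nat.sub_zero x)
      rw [h2, List.map_id]
    | succ k =>
      have hf : List.filter ((fun x => decide (k + 1 ≤ x)) ∘ (· + 1)) (qpositions t 0) =
          List.filter (fun x => decide (k ≤ x)) (qpositions t 0) :=
        List.filter_congr (fun x _ => by
          simp only [Function.comp_apply]
          exact decide_eq_decide.mpr ⟨fun h => by omega, fun h => by omega⟩)
      rw [List.drop_succ_cons, ih k, qpos_cons]
      by_cases hc : c = '?'
      · rw [if_pos hc, List.filter_cons, if_neg (by simp), List.filter_map, List.map_map, hf]
        exact (List.map_congr_left (fun x _ => by simp only [Function.comp_apply]; omega)).symm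
      · rw [if_neg hc, List.filter_map, List.map_map, hf]
        exact (List.map_congr_left (fun x _ => by simp only [Function.comp_apply]; omega)).symm

theorem bLoop_acc (f s : List Char) (qs : List Nat) (r : Int) :
    bLoop f s r qs = (bLoop f s 0 qs).map (r + ·) := by
  induction qs generalizing r with
  | nil => simp [bLoop]
  | cons p rest ih =>
    simp only [bLoop]
    cases hg : PySem.List.pyGet? f (p : Int) with
    | none => simp [hg]
    | some c =>
      simp only [hg]
      cases ho : PySem.Int.ofChars? [c] with
      | none => simp [ho]
      | some d =>
        simp only [ho]
        cases rest with
        | nil => by_cases hd : d > 0 <;> simp [hd] <;> ring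
        | cons q rest2 =>
          simp only [List.length_cons]
          by_cases hgt : pyLtChars (PySem.List.slice s (some ((p : Int) + 1)) (some (q : Int)))
              (PySem.List.slice f (some ((p : Int) + 1)) (some (q : Int))) = true
          · by_cases hd : d > 0 <;> simp [hgt, hd] <;> ring
          · by_cases heq : PySem.List.slice f (some ((p : Int) + 1)) (some (q : Int)) =
                PySem.List.slice s (some ((p : Int) + 1)) (some (q : Int))
            · have hgt' : pyLtChars (PySem.List.slice s (some ((p : Int) + 1)) (some (q : Int)))
                  (PySem.List.slice f (some ((p : Int) + 1)) (some (q : Int))) = false :=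
                eq_false_of_ne_true hgt
              rw [heq] at hgt'
              rw [ih]
              conv_rhs => rw [ih]
              simp only [heq, hgt', Bool.false_eq_true, if_false, ne_eq, not_true_eq_false,
                Option.map_map]
              cases hb : bLoop f s 0 (q :: rest2) with
              | none => rfl
              | some v => by_cases hd : d > 0 <;> simp [hd] <;> try ring
            · by_cases hd : d > 0 <;> simp [hgt, heq, hd] <;> ring

theorem slice_drop_eq (f : List Char) (q p q' : Nat) (hqp : q ≤ p) (hpq' : p < q') :
    PySem.List.slice f (some ((p : Int) + 1)) (some (q' : Int)) =
      PySem.List.slice (f.drop q) (some (((p - q : Nat) : Int) + 1)) (some ((q' - q : Nat) : Int)) := by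
  have h1 : ((p : Int) + 1) = (((p + 1 : Nat) : Int)) := by push_cast; ring
  have h2 : (((p - q : Nat) : Int) + 1) = (((p - q + 1 : Nat) : Int)) := by push_cast; ring
  rw [h1, h2, PySem.List.slice_natCast, PySem.List.slice_natCast, List.drop_drop]
  congr 1
  · omega
  · congr 1
    omega

theorem bLoop_drop (f s : List Char) (q : Nat) :
    ∀ (qs : List Nat) (r : Int), (∀ x ∈ qs, q ≤ x) → qs.Pairwise (· < ·) →
      bLoop f s r qs = bLoop (f.drop q) (s.drop q) r (qs.map (· - q)) := by
  intro qs
  induction qs with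
  | nil => intro r _ _; simp [bLoop]
  | cons p rest ih =>
    intro r hge hpw
    have hqp : q ≤ p := hge p (by simp)
    have hget : PySem.List.pyGet? (f.drop q) ((p - q : Nat) : Int) = PySem.List.pyGet? f (p : Int) := by
      rw [PySem.List.pyGet?_natCast, PySem.List.pyGet?_natCast, List.getElem?_drop]
      rw [show q + (p - q) = p by omega]
    simp only [List.map_cons, bLoop, hget]
    cases hg : PySem.List.pyGet? f (p : Int) with
    | none => simp [hg]
    | some c =>
      simp only [hg]
      cases ho : PySem.Int.ofChars? [c] with
      | none => simp [ho]
      | some d =>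
        simp only [ho, List.length_map]
        cases rest with
        | nil => rfl
        | cons q' rest2 =>
          have hpq' : p < q' := (List.pairwise_cons.mp hpw).1 q' (by simp)
          simp only [List.map_cons]
          rw [← slice_drop_eq f q p q' hqp hpq', ← slice_drop_eq s q p q' hqp hpq']
          by_cases hgt : pyLtChars (PySem.List.slice s (some ((p : Int) + 1)) (some (q' : Int)))
              (PySem.List.slice f (some ((p : Int) + 1)) (some (q' : Int))) = true
          · simp [hgt]
          · by_cases heq : PySem.List.slice f (some ((p : Int) + 1)) (some (q' : Int)) =
                PySem.List.slice s (some ((p : Int) + 1)) (some (q' : Int))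
            · have hgt' : pyLtChars (PySem.List.slice s (some ((p : Int) + 1)) (some (q' : Int)))
                  (PySem.List.slice f (some ((p : Int) + 1)) (some (q' : Int))) = false :=
                eq_false_of_ne_true hgt
              rw [heq] at hgt'
              simp only [heq, hgt', Bool.false_eq_true, if_false, ne_eq, not_true_eq_false,
                List.map_cons]
              exact ih _ (fun x hx => hge x (List.mem_cons_of_mem _ hx)) (List.pairwise_cons.mp hpw).2
            · simp [hgt, heq]

theorem main_lemma : ∀ (n : Nat) (F S : List Char) (p : Nat) (rest : List Nat),
    qpositions S 0 = p :: rest → (rest = [] → p ≤ 98) → rest.length < n →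
    calc_go n F S = bLoop F S 0 (p :: rest) := by
  intro n
  induction n with
  | zero => intro F S p rest _ _ h; omega
  | succ m ih =>
    intro F S p rest hq hnq hlen
    have hpw : (p :: rest).Pairwise (· < ·) := hq ▸ qpos_sorted S
    have hfirst : find_first_unknown_digit S = (p : Int) := by
      unfold find_first_unknown_digit
      rw [qpos_index?, hq]
      rfl
    have hslice1 : PySem.List.slice S (some ((p : Int) + 1)) none = S.drop (p + 1) := by
      rw [show ((p : Int) + 1) = (((p + 1 : Nat) : Int)) by push_cast; ring,
        PySem.List.slice_from_natCast]
    have hdrop1 : qpositions (S.drop (p + 1)) 0 = rest.map (· - (p + 1)) := by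
      rw [qpos_drop, hq, List.filter_cons, if_neg (by simp only [decide_eq_true_eq]; omega),
        List.filter_eq_self.mpr (fun x hx => by
          have h := (List.pairwise_cons.mp hpw).1 x hx
          simp only [decide_eq_true_eq]; omega)]
    have hcountp : (S.drop p).countP (· == '?') = rest.length + 1 := by
      rw [qpos_count, qpos_drop, hq, List.filter_cons, if_pos (by simp),
        List.filter_eq_self.mpr (fun x hx => by
          have h := (List.pairwise_cons.mp hpw).1 x hx
          simp only [decide_eq_true_eq]; omega)]
      simp
    have hsliceP : ∀ (L : List Char), PySem.List.slice L (some (p : Int)) none = L.drop p :=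
      fun L => by rw [PySem.List.slice_from_natCast]
    have hgetF : PySem.List.pyGet? (F.drop p) 0 = PySem.List.pyGet? F (p : Int) := by
      rw [PySem.List.pyGet?_zero, PySem.List.pyGet?_natCast, List.getElem?_drop, Nat.add_zero]
    cases rest with
    | nil =>
      have hp98 : p ≤ 98 := hnq rfl
      have hsecond : find_second_unknown_digit (S.drop (p + 1)) = -100 := by
        unfold find_second_unknown_digit
        rw [qpos_index?, hdrop1, List.map_nil]
        rfl
      simp only [calc_go, hfirst, hslice1, hsecond]
      rw [if_pos (by positivity), if_neg (by omega)]
      simp only [first_case, hsliceP, hgetF, hcountp, bLoop, List.length_nil]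
      cases hgF : PySem.List.pyGet? F (p : Int) with
      | none => simp [hgF]
      | some c =>
        simp only [hgF]
        cases hoC : PySem.Int.ofChars? [c] with
        | none => simp [hoC]
        | some d =>
          simp only [hoC]
          by_cases hd : d > 0 <;> simp [hd]
    | cons q rest2 =>
      have hpq : p < q := (List.pairwise_cons.mp hpw).1 q (by simp)
      have hsecond : find_second_unknown_digit (S.drop (p + 1)) = ((q - (p + 1) : Nat) : Int) := by
        unfold find_second_unknown_digit
        rw [qpos_index?, hdrop1, List.map_cons]
        rfl
      have hidx2 : ((q - (p + 1) : Nat) : Int) + (p : Int) + 1 = (q : Int) := by omega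
      have hdropq : qpositions (S.drop q) 0 = 0 :: rest2.map (· - q) := by
        rw [qpos_drop, hq, List.filter_cons, if_neg (by simp only [decide_eq_true_eq]; omega),
          List.filter_cons, if_pos (by simp),
          List.filter_eq_self.mpr (fun x hx => by
            have h := (List.pairwise_cons.mp (List.pairwise_cons.mp hpw).2).1 x hx
            simp only [decide_eq_true_eq]; omega)]
        simp
      have hsliceQ : ∀ (L : List Char), PySem.List.slice L (some (q : Int)) none = L.drop q :=
        fun L => by rw [PySem.List.slice_from_natCast]
      have hih : calc_go m (F.drop q) (S.drop q) =
          bLoop (F.drop q) (S.drop q) 0 (0 :: rest2.map (· - q)) := by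
        apply ih _ _ _ _ hdropq (fun _ => by omega)
        simp only [List.length_map]
        simp only [List.length_cons] at hlen
        omega
      have hge : ∀ x ∈ q :: rest2, q ≤ x := by
        intro x hx
        rcases List.mem_cons.mp hx with h | h
        · omega
        · have := (List.pairwise_cons.mp (List.pairwise_cons.mp hpw).2).1 x h
          omega
      have hB : ∀ r : Int, bLoop F S r (q :: rest2) =
          (bLoop (F.drop q) (S.drop q) 0 (0 :: rest2.map (· - q))).map (r + ·) := by
        intro r
        rw [bLoop_drop F S q (q :: rest2) r hge (List.pairwise_cons.mp hpw).2]
        simp only [List.map_cons, Nat.sub_self]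
        exact bLoop_acc _ _ _ r
      simp only [calc_go, hfirst, hslice1, hsecond, hidx2]
      rw [if_pos (by positivity), if_pos (by positivity)]
      simp only [first_case, hsliceP, hgetF, hcountp, hsliceQ]
      conv_rhs => rw [bLoop]
      cases hgF : PySem.List.pyGet? F (p : Int) with
      | none => simp [hgF]
      | some c =>
        simp only [hgF]
        cases hoC : PySem.Int.ofChars? [c] with
        | none => simp [hoC]
        | some d =>
          simp only [hoC, List.length_cons, Nat.add_sub_cancel]
          have hfc : (if d > 0 then some (d * (10 : Int) ^ (rest2.length + 1)) else some (0 : Int)) =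
              some (if d > 0 then d * (10 : Int) ^ (rest2.length + 1) else 0) := by
            split_ifs <;> rfl
          simp only [hfc]
          by_cases hgt : pyLtChars (PySem.List.slice S (some ((p : Int) + 1)) (some (q : Int)))
              (PySem.List.slice F (some ((p : Int) + 1)) (some (q : Int))) = true
          · have hc2 : compare_py (PySem.List.slice F (some ((p : Int) + 1)) (some (q : Int)))
                (PySem.List.slice S (some ((p : Int) + 1)) (some (q : Int))) = 2 := by
              unfold compare_py
              rw [if_pos hgt]
            rw [if_pos hc2, if_pos hgt]
            simp only [bigger_num, hcountp, List.length_cons, Nat.add_sub_cancel]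
            by_cases hd : d > 0 <;> simp [hd] <;> ring
          · by_cases heq : PySem.List.slice F (some ((p : Int) + 1)) (some (q : Int)) =
                PySem.List.slice S (some ((p : Int) + 1)) (some (q : Int))
            · have hc1 : compare_py (PySem.List.slice F (some ((p : Int) + 1)) (some (q : Int)))
                  (PySem.List.slice S (some ((p : Int) + 1)) (some (q : Int))) = 1 := by
                unfold compare_py
                rw [if_neg hgt, if_pos heq]
              have h2 : ¬ compare_py (PySem.List.slice F (some ((p : Int) + 1)) (some (q : Int)))
                  (PySem.List.slice S (some ((p : Int) + 1)) (some (q : Int))) = 2 := by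
                rw [hc1]
                decide
              have h0 : ¬ compare_py (PySem.List.slice F (some ((p : Int) + 1)) (some (q : Int)))
                  (PySem.List.slice S (some ((p : Int) + 1)) (some (q : Int))) = 0 := by
                rw [hc1]
                decide
              rw [if_neg h2, if_neg h0, if_neg hgt,
                if_neg (show ¬ (PySem.List.slice F (some ((p : Int) + 1)) (some (q : Int)) ≠
                  PySem.List.slice S (some ((p : Int) + 1)) (some (q : Int))) from fun h => h heq)]
              rw [hih, hB]
              cases hb : bLoop (F.drop q) (S.drop q) 0 (0 :: rest2.map (· - q)) with
              | none => rfl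
              | some v => by_cases hd : d > 0 <;> simp [hd] <;> try ring
            · have h0 : compare_py (PySem.List.slice F (some ((p : Int) + 1)) (some (q : Int)))
                  (PySem.List.slice S (some ((p : Int) + 1)) (some (q : Int))) = 0 := by
                unfold compare_py
                rw [if_neg hgt, if_neg heq]
              have h2 : ¬ compare_py (PySem.List.slice F (some ((p : Int) + 1)) (some (q : Int)))
                  (PySem.List.slice S (some ((p : Int) + 1)) (some (q : Int))) = 2 := by
                rw [h0]
                decide
              rw [if_neg h2, if_pos h0, if_neg hgt, if_pos heq]
              by_cases hd : d > 0 <;> simp [hd]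

-- ===== VERDICT (by name: the statement is the Claim_ definition above) =====
theorem calculate_possibilities_spec : Claim_equal_calculate_possibilities := by
  unfold Claim_equal_calculate_possibilities
  intro f s _ hpre
  unfold Spec_calculate_possibilities calculate_possibilities calculate_possibilities_alt
  cases hq : qpositions s.toList 0 with
  | nil =>
    have hfirst0 : find_first_unknown_digit s.toList = -100 := by
      unfold find_first_unknown_digit
      rw [qpos_index?, hq]
      rfl
    simp only [calc_go, hfirst0]
    rw [if_neg (by decide)]
    simp [hq]
  | cons p rest =>
    have hmem : p ∈ qpositions s.toList 0 := by
      rw [hq]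
      exact List.mem_cons_self
    have hget : s.toList[p]? = some '?' := (qpos_mem s.toList p).mp hmem
    obtain ⟨hlt, hval⟩ := List.getElem?_eq_some_iff.mp hget
    have hnq : rest = [] → p ≤ 98 := by
      intro hrest
      have hcount : s.toList.countP (· == '?') = 1 := by
        rw [qpos_count, hq, hrest]
        rfl
      exact (hpre p hlt hval).2 hcount
    have hlen : rest.length < s.toList.length + 1 := by
      have h1 := qpos_length_le s.toList
      rw [hq] at h1
      simp only [List.length_cons] at h1
      omega
    rw [main_lemma (s.toList.length + 1) f.toList s.toList p rest hq hnq hlen]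
    simp [hq]
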